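-- pv_equiv track=rewrite | github.com/Kadika38/Learning | learned_pys/code_challenges_II/strings.py | count_multi_char_x
-- ===== SOURCE A (Python) =====
-- def count_multi_char_x(word, x):
--   l = len(x)
--   c = 0
--   index = 0
--   for cha in word:
--     if x[index] == cha:
--       index += 1
--     if index == l:
--       index = 0
--       c += 1
--   return c
-- ===== SOURCE B (Python) =====
-- def count_multi_char_x(word, x):
--     # One shared iterator over word; for each character of x, consume the
--     # iterator until that character is found; count completed rounds.
--     it = iter(word)
--     c = 0
--     while True:
--         for ch in x:
--             if not any(ch == w for w in it):
--                 return c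
--         c += 1
-- ===== Notes on version B (the rewrite author's own statement) =====
-- stated objective: alternative
-- what changed: Replaces A's single pass with an explicit (index, count) state machine over word by an iterator-consuming decomposition: for each character of x, consume the shared word iterator until that character appears, counting completed rounds.
-- outside the precondition, e.g. on count_multi_char_x('', ''): A returns 0, B does not finish within the time limit
import Mathlib
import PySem

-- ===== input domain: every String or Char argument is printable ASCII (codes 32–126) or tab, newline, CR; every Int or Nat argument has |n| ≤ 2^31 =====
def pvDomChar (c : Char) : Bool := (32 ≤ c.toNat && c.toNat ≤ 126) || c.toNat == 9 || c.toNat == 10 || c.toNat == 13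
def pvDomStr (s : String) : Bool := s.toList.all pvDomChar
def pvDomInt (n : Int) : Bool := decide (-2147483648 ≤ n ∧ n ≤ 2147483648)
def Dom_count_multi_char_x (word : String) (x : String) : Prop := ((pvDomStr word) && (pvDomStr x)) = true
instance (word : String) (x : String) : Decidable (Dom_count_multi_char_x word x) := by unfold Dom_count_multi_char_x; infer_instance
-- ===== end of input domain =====

-- B replaces A's per-character state machine by an iterator-consuming decomposition:
-- for each character of x, scan the shared word iterator forward until it is found,
-- counting completed rounds (objective: simpler/alternative; return value only, no mutation).

-- ===== PORT A =====
-- one loop step of A: cha is the current character of word, state is (index, c)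
def pvStepA (xs : List Char) (l : Int) (st : Int × Int) (cha : Char) : Int × Int :=
  let index := if PySem.List.pyGet? xs st.1 = some cha then st.1 + 1 else st.1
  if index = l then (0, st.2 + 1) else (index, st.2)

def count_multi_char_x (word : String) (x : String) : Int :=
  let l := PySem.Str.len x
  (word.toList.foldl (pvStepA x.toList l) (0, 0)).2

-- ===== PORT B =====
-- `any(ch == w for w in it)`: consume the iterator (remaining word chars) up to and
-- including the first occurrence of ch; none = iterator exhausted without finding ch.
def pvFindFrom (ws : List Char) (ch : Char) : Option (List Char) :=
  match ws with
  | [] => none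
  | w :: ws' => if ch = w then some ws' else pvFindFrom ws' ch

-- the `for ch in x` loop of one round: match every char of x, return the rest of the iterator
def pvMatchAll (ws : List Char) (xs : List Char) : Option (List Char) :=
  match xs with
  | [] => some ws
  | ch :: cs =>
    match pvFindFrom ws ch with
    | none => none
    | some ws' => pvMatchAll ws' cs

theorem pvFindFrom_length {ws : List Char} {ch : Char} {ws' : List Char}
    (h : pvFindFrom ws ch = some ws') : ws'.length < ws.length := by
  induction ws with
  | nil => simp [pvFindFrom] at h
  | cons w t ih =>
    simp only [pvFindFrom] at h
    split at h
    · cases h; simp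
    · exact Nat.lt_trans (ih h) (by simp)

theorem pvMatchAll_length {ws xs ws' : List Char}
    (h : pvMatchAll ws xs = some ws') : ws'.length + xs.length ≤ ws.length := by
  induction xs generalizing ws with
  | nil => simp [pvMatchAll] at h; simp [h]
  | cons c cs ih =>
    simp only [pvMatchAll] at h
    cases hf : pvFindFrom ws c with
    | none => rw [hf] at h; cases h
    | some w1 =>
      rw [hf] at h
      have := ih h
      have := pvFindFrom_length hf
      simp only [List.length_cons]; omega

-- the `while True` loop (terminates because each round consumes ≥ |xs| ≥ 1 chars)
def pvCountB (xs : List Char) (hxs : xs ≠ []) (ws : List Char) : Int :=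
  match h : pvMatchAll ws xs with
  | none => 0
  | some ws' => 1 + pvCountB xs hxs ws'
termination_by ws.length
decreasing_by
  have := pvMatchAll_length h
  have : 0 < xs.length := List.length_pos_iff.mpr hxs
  omega

def count_multi_char_x_alt (word : String) (x : String) : Int :=
  if h : x.toList = [] then 0   -- totality guard only: Python B does not terminate for empty x
  else pvCountB x.toList h word.toList

-- ===== PRECONDITION & SPEC =====
-- Pre_ excludes empty x: there A raises IndexError whenever word is non-empty, and on the
-- single remaining corner ("", "") (where A returns 0) B's while-loop never terminates.
def Pre_count_multi_char_x (word : String) (x : String) : Prop := x ≠ ""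
instance (word : String) (x : String) : Decidable (Pre_count_multi_char_x word x) := by unfold Pre_count_multi_char_x; infer_instance
def pvWitness_count_multi_char_x : String × String := ("banana", "an")

def Spec_count_multi_char_x (word : String) (x : String) (out : Int) : Prop := out = count_multi_char_x_alt word x
instance (word : String) (x : String) (out : Int) : Decidable (Spec_count_multi_char_x word x out) := by unfold Spec_count_multi_char_x; infer_instance

-- ===== CLAIM (what is proved, stated in full; the proofs are below) =====
def Claim_equal_count_multi_char_x : Prop := ∀ (word : String) (x : String), Dom_count_multi_char_x word x → Pre_count_multi_char_x word x → Spec_count_multi_char_x word x (count_multi_char_x word x)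

-- ===== LEMMAS AND PROOFS =====

-- the value B computes after a partial round: one match of `rest`, then full rounds of xs
def pvCountPartial (xs : List Char) (hxs : xs ≠ []) (ws rest : List Char) : Int :=
  match pvMatchAll ws rest with
  | none => 0
  | some ws' => 1 + pvCountB xs hxs ws'

theorem pvCountB_eq_partial (xs : List Char) (hxs : xs ≠ []) (ws : List Char) :
    pvCountB xs hxs ws = pvCountPartial xs hxs ws xs := by
  conv_lhs => rw [pvCountB]
  cases hm : pvMatchAll ws xs <;> simp [pvCountPartial, hm]

theorem pvMain (xs : List Char) (hxs : xs ≠ []) (ws : List Char) :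
    ∀ (k : Nat) (c : Int), k < xs.length →
      (ws.foldl (pvStepA xs (xs.length : Int)) ((k : Int), c)).2
        = c + pvCountPartial xs hxs ws (xs.drop k) := by
  induction ws with
  | nil =>
    intro k c hk
    have hdrop : xs.drop k ≠ [] := by
      simp [List.drop_eq_nil_iff]; omega
    cases hd : xs.drop k with
    | nil => exact absurd hd hdrop
    | cons d ds => simp [pvCountPartial, pvMatchAll, pvFindFrom]
  | cons w ws' ih =>
    intro k c hk
    have hget : PySem.List.pyGet? xs ((k : Nat) : Int) = xs[k]? := PySem.List.pyGet?_natCast xs k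
    have hgetk : xs[k]? = some xs[k] := List.getElem?_eq_getElem hk
    have hdrop : xs.drop k = xs[k] :: xs.drop (k + 1) := List.drop_eq_getElem_cons hk
    simp only [List.foldl_cons]
    by_cases hc : xs[k] = w
    · -- the current word char matches x[k]
      have hstep : pvStepA xs (xs.length : Int) ((k : Int), c) w
          = if ((k : Int) + 1 = (xs.length : Int)) then (0, c + 1) else (((k : Int) + 1), c) := by
        simp [pvStepA, hget, hgetk, hc]
      have hfind : pvFindFrom (w :: ws') xs[k] = some ws' := by
        simp [pvFindFrom, hc]
      by_cases hl : k + 1 = xs.length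
      · -- full match completed: reset to index 0, count + 1
        have hdrop1 : xs.drop (k + 1) = [] := by simp [List.drop_eq_nil_iff]; omega
        rw [hstep, if_pos (by exact_mod_cast hl)]
        have h0 : ((0 : Nat) : Int) = (0 : Int) := rfl
        rw [show ((0 : Int), c + 1) = (((0 : Nat) : Int), c + 1) by norm_num]
        rw [ih 0 (c + 1) (List.length_pos_iff.mpr hxs)]
        simp only [List.drop_zero]
        rw [← pvCountB_eq_partial xs hxs ws']
        have : pvCountPartial xs hxs (w :: ws') (xs.drop k)
            = 1 + pvCountB xs hxs ws' := by
          rw [hdrop, hdrop1, pvCountPartial]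
          simp [pvMatchAll, hfind]
        rw [this]; ring
      · -- partial match: advance index to k+1
        rw [hstep, if_neg (by intro h; exact hl (by exact_mod_cast h))]
        rw [show ((k : Int) + 1) = (((k + 1 : Nat)) : Int) by push_cast; ring]
        rw [ih (k + 1) c (by omega)]
        congr 1
        rw [hdrop]
        simp [pvCountPartial, pvMatchAll, hfind]
    · -- no match: index stays k
      have hstep : pvStepA xs (xs.length : Int) ((k : Int), c) w = ((k : Int), c) := by
        have hne : ¬ (PySem.List.pyGet? xs ((k : Nat) : Int) = some w) := by
          rw [hget, hgetk]; simp [hc]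
        simp only [pvStepA, if_neg hne]
        rw [if_neg (by intro h; exact absurd (Nat.cast_inj.mp h) (by omega))]
      rw [hstep, ih k c hk]
      congr 1
      rw [hdrop]
      have hfind : pvFindFrom (w :: ws') xs[k] = pvFindFrom ws' xs[k] := by
        simp [pvFindFrom, hc]
      simp [pvCountPartial, pvMatchAll, hfind]

-- ===== VERDICT (by name: the statement is the Claim_ definition above) =====
theorem count_multi_char_x_spec : Claim_equal_count_multi_char_x := by
  intro word x _ hpre
  unfold Spec_count_multi_char_x count_multi_char_x count_multi_char_x_alt
  have hxs : x.toList ≠ [] := by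
    intro h
    exact hpre (by rwa [String.toList_eq_nil_iff] at h)
  rw [dif_neg hxs]
  have hlen : PySem.Str.len x = (x.toList.length : Int) := by
    simp [PySem.Str.len_eq]
  have h0 : ((0 : Int), (0 : Int)) = (((0 : Nat) : Int), (0 : Int)) := by norm_num
  simp only [hlen, h0]
  rw [pvMain x.toList hxs word.toList 0 0 (List.length_pos_iff.mpr hxs)]
  simp [← pvCountB_eq_partial]
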